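-- pv_equiv track=rewrite | github.com/HenriqueDSousa/CS | Alg2/LZ78/lz78.py | lz78_encode
-- ===== SOURCE A (Python) =====
-- class TrieNode:
--
--     def __init__(self):
--         self.children = {}
--         self.index = 0
--
--     def insert(self,char, index):
--         child = TrieNode()
--         self.children[char] = child
--         child.index  = index
--
-- def lz78_encode(text):
--
--     # inicializa trie com no raiz que representa o simbolo de vazio
--     root = TrieNode()
--
--     code = []
--     node = root
--     index = 0
--     largest_index = index
--     char_size = 0
--
--     for c in text:
--
--         if c in node.children: # se c ja estiver no no, caminhe para o proximo no
--
--             node = node.children[c]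
--
--         else:
--             # o prefixo é a concatenacao do prefixo ja existente com c
--             code.append((node.index, c))
--             char_size = max(char_size, len(format(ord(c), '08b')))
--             index += 1
--
--             if index > largest_index:
--                 largest_index = index
--
--             # inserindo na trie novo prefixo
--             node.insert(c, index)
--             node = root
--
--     if node.index != 0:
--         code.append((node.index, ""))
--
--
--     index_width = largest_index.bit_length()
--     index_width = index_width + 7
--     index_width -= (index_width % 8)
--
--     #padding para fit nos bytes
--     char_size = char_size + 7
--     char_size -= (char_size % 8)
--
--     return code, index_width, char_size
-- ===== SOURCE B (Python) =====
-- def lz78_encode(text):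
--     # Stage 1: greedy-parse the text into its LZ78 phrase list using a flat
--     # dict of phrases; each emitted phrase is recorded as (prefix, new char).
--     table = {}
--     phrases = []
--     w = ""
--     for c in text:
--         w += c
--         if w not in table:
--             table[w] = len(table) + 1
--             phrases.append((w[:-1], c))
--             w = ""
--
--     # Stage 2: derive the code list and the char width from the phrase list.
--     code = [(table.get(p, 0), c) for (p, c) in phrases]
--     if w:
--         code.append((table[w], ""))
--
--     char_size = 0
--     for _, c in phrases:
--         char_size = max(char_size, len(format(ord(c), '08b')))
--
--     index_width = len(phrases).bit_length()
--     index_width = index_width + 7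
--     index_width -= (index_width % 8)
--
--     char_size = char_size + 7
--     char_size -= (char_size % 8)
--
--     return code, index_width, char_size
-- ===== Notes on version B (the rewrite author's own statement) =====
-- stated objective: simpler
-- what changed: Replaced A's single trie-walking loop that interleaves code emission, index and char_size bookkeeping by a two-stage pipeline: a greedy parse into the LZ78 phrase list using a flat dict of phrase strings, then separate passes deriving the code list, char width and index width from that phrase list.
import Mathlib
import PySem

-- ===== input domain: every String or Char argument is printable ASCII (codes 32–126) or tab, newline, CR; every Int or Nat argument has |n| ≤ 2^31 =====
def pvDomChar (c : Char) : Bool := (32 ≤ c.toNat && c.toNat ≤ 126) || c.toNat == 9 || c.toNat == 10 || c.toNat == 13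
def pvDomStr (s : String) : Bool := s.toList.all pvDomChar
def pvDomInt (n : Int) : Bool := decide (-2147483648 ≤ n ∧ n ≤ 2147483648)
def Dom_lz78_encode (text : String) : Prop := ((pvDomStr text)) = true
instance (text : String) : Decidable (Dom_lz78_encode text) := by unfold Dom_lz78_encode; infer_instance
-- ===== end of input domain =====

-- B replaces A's single trie-walking loop by a two-stage pipeline: a greedy parse of the
-- text into its LZ78 phrase list via a flat dict, then separate passes deriving the code
-- list, char width and index width from that phrase list (objective: simpler).

-- ===== PORT A =====
-- The mutable trie heap is encoded as a list of nodes, node k = (children map, index);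
-- a child pointer is the node's position in the list (allocation order), exactly the
-- object graph A builds.
def lzStepA (st : List (PySem.Dict Char Nat × Int) × Nat × List (Int × String) × Int × Int × Int)
    (c : Char) : List (PySem.Dict Char Nat × Int) × Nat × List (Int × String) × Int × Int × Int :=
  let (heap, node, code, index, largest, charSize) := st
  let cur := heap.getD node (PySem.Dict.empty, 0)
  match cur.1.get? c with
  | some j => (heap, j, code, index, largest, charSize)
  | none =>
    let code := code ++ [(cur.2, String.ofList [c])]
    -- len(format(ord(c), '08b')) = max 8 (bit length of ord c): exact, '08b' pads to ≥ 8 digits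
    let charSize := max charSize (max 8 ((PySem.Int.bitLength (c.toNat : Int) : Int)))
    let index := index + 1
    let largest := if largest < index then index else largest
    let heap := (heap.set node (cur.1.insert c heap.length, cur.2)) ++ [(PySem.Dict.empty, index)]
    (heap, 0, code, index, largest, charSize)

def lz78_encode (text : String) : (List (Int × String)) × Int × Int :=
  let st := text.toList.foldl lzStepA ([(PySem.Dict.empty, 0)], 0, [], 0, 0, 0)
  let (heap, node, code, _index, largest, charSize) := st
  let cur := heap.getD node (PySem.Dict.empty, 0)
  let code := if cur.2 ≠ 0 then code ++ [(cur.2, "")] else code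
  let iw := (PySem.Int.bitLength largest : Int) + 7
  let iw := iw - PySem.Int.mod iw 8
  let cs := charSize + 7
  let cs := cs - PySem.Int.mod cs 8
  (code, iw, cs)

-- ===== PORT B =====
-- Stage 1 of Source B: phrase keys are List Char (the contents of B's Python string keys);
-- each emitted phrase is recorded as (prefix, new char); w[:-1] on the nonempty w is dropLast.
def lzParseStep (st : PySem.Dict (List Char) Int × List (List Char × Char) × List Char)
    (c : Char) : PySem.Dict (List Char) Int × List (List Char × Char) × List Char :=
  let (table, phrases, w) := st
  let w := w ++ [c]
  if table.contains w then (table, phrases, w)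
  else (table.insert w ((table.size : Int) + 1), phrases ++ [(w.dropLast, c)], [])

-- Stage 2 of Source B: the list comprehension producing the code pairs
def lzEmit (table : PySem.Dict (List Char) Int) (phrases : List (List Char × Char)) :
    List (Int × String) :=
  phrases.map (fun pc => (table.getD pc.1 0, String.ofList [pc.2]))

-- Stage 2 of Source B: the char_size maximum loop; len(format(ord(c),'08b')) = max 8 (bitLength (ord c))
def lzCz (phrases : List (List Char × Char)) : Int :=
  phrases.foldl (fun a pc => max a (max 8 ((PySem.Int.bitLength (pc.2.toNat : Int) : Int)))) 0

def lz78_encode_alt (text : String) : (List (Int × String)) × Int × Int :=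
  let (table, phrases, w) := text.toList.foldl lzParseStep (PySem.Dict.empty, [], [])
  let code := lzEmit table phrases
  -- table[w]: a non-empty leftover w is always a key, so getD is exact
  let code := if w ≠ [] then code ++ [(table.getD w 0, "")] else code
  let iw := (PySem.Int.bitLength (phrases.length : Int) : Int) + 7
  let iw := iw - PySem.Int.mod iw 8
  let cs := lzCz phrases + 7
  let cs := cs - PySem.Int.mod cs 8
  (code, iw, cs)

-- ===== PRECONDITION & SPEC =====
def Spec_lz78_encode (text : String) (out : (List (Int × String)) × Int × Int) : Prop := out = lz78_encode_alt text
instance (text : String) (out : (List (Int × String)) × Int × Int) : Decidable (Spec_lz78_encode text out) := by unfold Spec_lz78_encode; infer_instance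

-- ===== CLAIM (what is proved, stated in full; the proofs are below) =====
def Claim_equal_lz78_encode : Prop := ∀ (text : String), Dom_lz78_encode text → Spec_lz78_encode text (lz78_encode text)

-- ===== LEMMAS AND PROOFS =====

-- walking a phrase down the trie heap from node i
def lzWalk (h : List (PySem.Dict Char Nat × Int)) : Nat → List Char → Option Nat
  | i, [] => some i
  | i, c :: cs =>
    match (h.getD i (PySem.Dict.empty, 0)).1.get? c with
    | some j => lzWalk h j cs
    | none => none

-- the node id the flat dict associates with a phrase
def lzPathId (d : PySem.Dict (List Char) Int) (p : List Char) : Option Nat :=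
  if p = [] then some 0 else (d.get? p).map Int.toNat

def lzInv (h : List (PySem.Dict Char Nat × Int)) (d : PySem.Dict (List Char) Int)
    (node : Nat) (w : List Char) (index : Int) : Prop :=
  1 ≤ h.length ∧
  (∀ p, lzWalk h 0 p = lzPathId d p) ∧
  lzWalk h 0 w = some node ∧
  (∀ k, k < h.length → (h.getD k (PySem.Dict.empty, 0)).2 = (k : Int)) ∧
  d.values = List.map (fun n : Nat => (n : Int)) (List.range' 1 (h.length - 1)) ∧
  index = (h.length : Int) - 1 ∧
  d.keys.Nodup ∧
  (∀ key ∈ d.keys, key ≠ []) ∧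
  (∀ key ∈ d.keys, ∀ p, p ≠ [] → p <+: key → p ∈ d.keys) ∧
  (∀ k, k < h.length → ∀ c j, (h.getD k (PySem.Dict.empty, 0)).1.get? c = some j → 0 < j ∧ j < h.length)

-- basic facts about lzWalk
theorem lzWalk_append (h : List (PySem.Dict Char Nat × Int)) (p q : List Char) :
    ∀ i, lzWalk h i (p ++ q) = (lzWalk h i p).bind (fun j => lzWalk h j q) := by
  induction p with
  | nil => intro i; simp [lzWalk]
  | cons c cs ih =>
    intro i
    simp only [List.cons_append, lzWalk]
    cases (h.getD i (PySem.Dict.empty, 0)).1.get? c with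
    | some j => simp [ih]
    | none => simp

theorem lzWalk_lt (h : List (PySem.Dict Char Nat × Int))
    (hb : ∀ k, k < h.length → ∀ c j, (h.getD k (PySem.Dict.empty, 0)).1.get? c = some j → 0 < j ∧ j < h.length) :
    ∀ (p : List Char) (i k : Nat), i < h.length → lzWalk h i p = some k → k < h.length := by
  intro p
  induction p with
  | nil => intro i k hi hw; simp [lzWalk] at hw; omega
  | cons c cs ih =>
    intro i k hi hw
    simp only [lzWalk] at hw
    cases hj : (h.getD i (PySem.Dict.empty, 0)).1.get? c with
    | some j =>
      rw [hj] at hw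
      exact ih j k (hb i hi c j hj).2 hw
    | none => rw [hj] at hw; exact absurd hw (by simp)

theorem lzVals_pos (d : PySem.Dict (List Char) Int) {n : Nat}
    (hvals : d.values = List.map (fun m : Nat => (m : Int)) (List.range' 1 n))
    {v : Int} (hv : v ∈ d.values) : 1 ≤ v := by
  rw [hvals] at hv
  simp only [List.mem_map] at hv
  obtain ⟨m, hm, rfl⟩ := hv
  have := List.mem_range'_1.mp hm
  omega

theorem lzPathId_inj (d : PySem.Dict (List Char) Int) {n : Nat}
    (hvals : d.values = List.map (fun m : Nat => (m : Int)) (List.range' 1 n))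
    {p q : List Char} {k : Nat}
    (hp : lzPathId d p = some k) (hq : lzPathId d q = some k) : p = q := by
  have hvnodup : d.values.Nodup := by
    rw [hvals]
    exact (List.nodup_range' ..).map (fun a b hab => by exact_mod_cast hab)
  unfold lzPathId at hp hq
  by_cases hpe : p = []
  · subst hpe
    simp at hp
    by_cases hqe : q = []
    · exact hqe.symm
    · rw [if_neg hqe] at hq
      obtain ⟨v, hv, hvk⟩ := Option.map_eq_some_iff.mp hq
      have h1 : 1 ≤ v := lzVals_pos d hvals (by
        have := PySem.Dict.mem_items_of_get?_eq_some d hv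
        simp only [PySem.Dict.values]
        exact List.mem_map.mpr ⟨_, this, rfl⟩)
      omega
  · rw [if_neg hpe] at hp
    obtain ⟨v, hv, hvk⟩ := Option.map_eq_some_iff.mp hp
    have h1 : 1 ≤ v := lzVals_pos d hvals (by
      have := PySem.Dict.mem_items_of_get?_eq_some d hv
      simp only [PySem.Dict.values]
      exact List.mem_map.mpr ⟨_, this, rfl⟩)
    by_cases hqe : q = []
    · subst hqe; simp at hq; omega
    · rw [if_neg hqe] at hq
      obtain ⟨v', hv', hvk'⟩ := Option.map_eq_some_iff.mp hq
      have h1' : 1 ≤ v' := lzVals_pos d hvals (by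
        have := PySem.Dict.mem_items_of_get?_eq_some d hv'
        simp only [PySem.Dict.values]
        exact List.mem_map.mpr ⟨_, this, rfl⟩)
      have hvv : v = v' := by omega
      subst hvv
      have hip := PySem.Dict.mem_items_of_get?_eq_some d hv
      have hiq := PySem.Dict.mem_items_of_get?_eq_some d hv'
      have := List.inj_on_of_nodup_map (f := Prod.snd) (by exact hvnodup) hip hiq rfl
      exact congrArg Prod.fst this

theorem lzWalk_step (h : List (PySem.Dict Char Nat × Int)) (i j : Nat) (x : Char)
    (hx : (h.getD i (PySem.Dict.empty, 0)).1.get? x = some j)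
    (q : List Char) (hq : lzWalk h 0 q = some i) : lzWalk h 0 (q ++ [x]) = some j := by
  rw [lzWalk_append, hq]
  show lzWalk h i [x] = some j
  simp only [lzWalk]
  rw [hx]

theorem lzWalk_step_none (h : List (PySem.Dict Char Nat × Int)) (i : Nat) (x : Char)
    (hx : (h.getD i (PySem.Dict.empty, 0)).1.get? x = none)
    (q : List Char) (hq : lzWalk h 0 q = some i) : lzWalk h 0 (q ++ [x]) = none := by
  rw [lzWalk_append, hq]
  show lzWalk h i [x] = none
  simp only [lzWalk]
  rw [hx]

theorem lzPathId_insert_ne (d : PySem.Dict (List Char) Int) (key r : List Char) (v : Int)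
    (h : r ≠ key) : lzPathId (d.insert key v) r = lzPathId d r := by
  unfold lzPathId
  by_cases hr : r = []
  · simp [hr]
  · rw [if_neg hr, if_neg hr, PySem.Dict.get?_insert, if_neg h]

theorem lzPathId_none (d : PySem.Dict (List Char) Int) (r : List Char)
    (hr : r ≠ []) (hmem : r ∉ d.keys) : lzPathId d r = none := by
  unfold lzPathId
  rw [if_neg hr, (PySem.Dict.get?_eq_none_iff_not_mem_keys d r).mpr hmem]
  rfl

theorem lzPathId_get_none (d : PySem.Dict (List Char) Int) (r : List Char)
    (hr : r ≠ []) (h : lzPathId d r = none) : d.get? r = none := by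
  unfold lzPathId at h
  rw [if_neg hr] at h
  exact Option.map_eq_none_iff.mp h

theorem lzPathId_mem_keys (d : PySem.Dict (List Char) Int) (r : List Char) (k : Nat)
    (hr : r ≠ []) (h : lzPathId d r = some k) : r ∈ d.keys := by
  unfold lzPathId at h
  rw [if_neg hr] at h
  obtain ⟨v, hv, -⟩ := Option.map_eq_some_iff.mp h
  by_contra hmem
  rw [(PySem.Dict.get?_eq_none_iff_not_mem_keys d r).mpr hmem] at hv
  exact absurd hv (by simp)

theorem lzWalk_insert
    (h : List (PySem.Dict Char Nat × Int)) (d : PySem.Dict (List Char) Int)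
    (node : Nat) (w : List Char) (c : Char)
    (h' : List (PySem.Dict Char Nat × Int))
    (hwp : ∀ p, lzWalk h 0 p = lzPathId d p)
    (hwn : lzWalk h 0 w = some node)
    (hvals : d.values = List.map (fun n : Nat => (n : Int)) (List.range' 1 (h.length - 1)))
    (hpc : ∀ key ∈ d.keys, ∀ p, p ≠ [] → p <+: key → p ∈ d.keys)
    (hcb : ∀ k, k < h.length → ∀ c j, (h.getD k (PySem.Dict.empty, 0)).1.get? c = some j → 0 < j ∧ j < h.length)
    (hnode : node < h.length)
    (hc : (h.getD node (PySem.Dict.empty, 0)).1.get? c = none)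
    (hgetne : ∀ k, k < h.length → k ≠ node → (h'.getD k (PySem.Dict.empty, 0)).1 = (h.getD k (PySem.Dict.empty, 0)).1)
    (hgetnode : (h'.getD node (PySem.Dict.empty, 0)).1 = (h.getD node (PySem.Dict.empty, 0)).1.insert c h.length)
    (hgetnew : (h'.getD h.length (PySem.Dict.empty, 0)).1 = PySem.Dict.empty) :
    ∀ (p : List Char) (k : Nat) (q : List Char), k < h.length → lzWalk h 0 q = some k →
      lzWalk h' k p = lzPathId (d.insert (w ++ [c]) ((h.length : Nat) : Int)) (q ++ p) := by
  have hpw : lzPathId d w = some node := by rw [← hwp]; exact hwn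
  have hwcnone : lzWalk h 0 (w ++ [c]) = none := lzWalk_step_none h node c hc w hwn
  have hwcpath : lzPathId d (w ++ [c]) = none := by rw [← hwp]; exact hwcnone
  have hwcmem : (w ++ [c]) ∉ d.keys :=
    (PySem.Dict.get?_eq_none_iff_not_mem_keys d _).mp (lzPathId_get_none d _ (by simp) hwcpath)
  have hinj : ∀ q, lzPathId d q = some node → q = w := fun q hq =>
    lzPathId_inj d hvals hq hpw
  have hnokey : ∀ (q : List Char) (x : Char) (rest : List Char),
      lzPathId d (q ++ [x]) = none → (q ++ x :: rest) ∉ d.keys := by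
    intro q x rest hnone hmem
    exact ((PySem.Dict.get?_eq_none_iff_not_mem_keys d _).mp
      (lzPathId_get_none d _ (by simp) hnone))
      (hpc _ hmem _ (by simp) ⟨rest, by simp⟩)
  -- the new dict at the new key
  have hd'wc : lzPathId (d.insert (w ++ [c]) ((h.length : Nat) : Int)) (w ++ [c]) = some h.length := by
    unfold lzPathId
    rw [if_neg (by simp), PySem.Dict.get?_insert_self]
    simp
  intro p
  induction p with
  | nil =>
    intro k q hk hq
    have hqp : lzPathId d q = some k := by rw [← hwp]; exact hq
    have hqne : q ≠ w ++ [c] := by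
      intro hh; rw [hh, hwcpath] at hqp; exact absurd hqp (by simp)
    simp only [lzWalk, List.append_nil]
    rw [lzPathId_insert_ne d _ _ _ hqne, hqp]
  | cons x rest ih =>
    intro k q hk hq
    have hqp : lzPathId d q = some k := by rw [← hwp]; exact hq
    simp only [lzWalk]
    by_cases hkn : k = node
    · subst hkn
      have hqw : q = w := hinj q hqp
      subst hqw
      rw [hgetnode, PySem.Dict.get?_insert]
      by_cases hx : x = c
      · subst hx
        rw [if_pos rfl]
        cases rest with
        | nil =>
          simp only [lzWalk]
          exact hd'wc.symm
        | cons y t =>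
          simp only [lzWalk, hgetnew, PySem.Dict.get?_empty]
          have hne : (q ++ x :: y :: t) ≠ q ++ [x] := by
            intro hh; simp at hh
          rw [lzPathId_insert_ne d _ _ _ hne,
            lzPathId_none d _ (by simp) (hnokey q x (y :: t) (by rw [← hwp]; exact hwcnone))]
      · rw [if_neg hx]
        cases hxj : (h.getD k (PySem.Dict.empty, 0)).1.get? x with
        | some j =>
          have hj := hcb k hk x j hxj
          have hq' : lzWalk h 0 (q ++ [x]) = some j := lzWalk_step h k j x hxj q hq
          have hih := ih j (q ++ [x]) hj.2 hq'
          simp only [List.append_assoc, List.singleton_append] at hih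
          simpa using hih
        | none =>
          have hnone : lzPathId d (q ++ [x]) = none := by
            rw [← hwp]; exact lzWalk_step_none h k x hxj q hq
          have hne : (q ++ x :: rest) ≠ q ++ [c] := by
            intro hh; simp at hh; exact hx hh.1
          rw [lzPathId_insert_ne d _ _ _ hne,
            lzPathId_none d _ (by simp) (hnokey q x rest hnone)]
    · rw [hgetne k hk hkn]
      cases hxj : (h.getD k (PySem.Dict.empty, 0)).1.get? x with
      | some j =>
        have hj := hcb k hk x j hxj
        have hq' : lzWalk h 0 (q ++ [x]) = some j := lzWalk_step h k j x hxj q hq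
        have hih := ih j (q ++ [x]) hj.2 hq'
        simp only [List.append_assoc, List.singleton_append] at hih
        simpa using hih
      | none =>
        have hnone : lzPathId d (q ++ [x]) = none := by
          rw [← hwp]; exact lzWalk_step_none h k x hxj q hq
        by_cases heq : q ++ x :: rest = w ++ [c]
        · exfalso
          cases rest with
          | nil =>
            have : q = w ∧ [x] = [c] := List.append_inj' (by simpa using heq) rfl
            obtain ⟨rfl, -⟩ := this
            rw [hpw] at hqp
            simp only [Option.some.injEq] at hqp
            exact hkn hqp.symm
          | cons y t =>
            have hwne : w ≠ [] := by
              intro hwnil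
              subst hwnil
              have := congrArg List.length heq
              simp at this
              omega
            have hpref : (q ++ [x]) <+: w := by
              have h1 : (q ++ [x]) <+: w ++ [c] := ⟨y :: t, by simpa using heq⟩
              rcases List.prefix_concat_iff.mp h1 with h2 | h2
              · exfalso
                have e1 := congrArg List.length heq
                have e2 := congrArg List.length h2
                simp at e1 e2
                omega
              · exact h2
            have hwk : w ∈ d.keys := lzPathId_mem_keys d w node hwne hpw
            have : (q ++ [x]) ∈ d.keys := hpc _ hwk _ (by simp) hpref
            exact ((PySem.Dict.get?_eq_none_iff_not_mem_keys d _).mp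
              (lzPathId_get_none d _ (by simp) hnone)) this
        · rw [lzPathId_insert_ne d _ _ _ heq,
            lzPathId_none d _ (by simp) (hnokey q x rest hnone)]

-- stage-2 bookkeeping: inserting a fresh nonempty key does not change the emitted pairs
theorem lzEmit_insert (d : PySem.Dict (List Char) Int) (phrases : List (List Char × Char))
    (key : List Char) (v : Int)
    (hp : ∀ pc ∈ phrases, pc.1 = [] ∨ pc.1 ∈ d.keys)
    (hmem : key ∉ d.keys) (hne : key ≠ []) :
    lzEmit (d.insert key v) phrases = lzEmit d phrases := by
  unfold lzEmit
  refine List.map_congr_left (fun pc hpc => ?_)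
  have hpcne : pc.1 ≠ key := by
    rcases hp pc hpc with h0 | hk
    · rw [h0]; exact fun hh => hne hh.symm
    · intro hh; rw [hh] at hk; exact hmem hk
  rw [PySem.Dict.getD_insert, if_neg hpcne]

theorem lzEmit_append (d : PySem.Dict (List Char) Int) (phrases : List (List Char × Char))
    (w : List Char) (c : Char) :
    lzEmit d (phrases ++ [(w, c)]) = lzEmit d phrases ++ [(d.getD w 0, String.ofList [c])] := by
  unfold lzEmit
  rw [List.map_append]
  rfl

theorem lzCz_append (phrases : List (List Char × Char)) (w : List Char) (c : Char) :
    lzCz (phrases ++ [(w, c)]) =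
      max (lzCz phrases) (max 8 ((PySem.Int.bitLength (c.toNat : Int) : Int))) := by
  unfold lzCz
  rw [List.foldl_append]
  rfl

-- the simulation: A's single trie loop tracks B's parse loop, with A's running code,
-- index and char_size determined by B's phrase list
theorem lzLoop (cs : List Char) :
    ∀ h d node w phrases, lzInv h d node w ((phrases.length : Nat) : Int) →
    (∀ pc ∈ phrases, pc.1 = [] ∨ pc.1 ∈ d.keys) →
    ∃ h' node' d' w' phrases',
      cs.foldl lzStepA (h, node, lzEmit d phrases, ((phrases.length : Nat) : Int), ((phrases.length : Nat) : Int), lzCz phrases)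
        = (h', node', lzEmit d' phrases', ((phrases'.length : Nat) : Int), ((phrases'.length : Nat) : Int), lzCz phrases') ∧
      cs.foldl lzParseStep (d, phrases, w) = (d', phrases', w') ∧
      lzInv h' d' node' w' ((phrases'.length : Nat) : Int) ∧
      (∀ pc ∈ phrases', pc.1 = [] ∨ pc.1 ∈ d'.keys) := by
  induction cs with
  | nil =>
    intro h d node w phrases hinv hp
    exact ⟨h, node, d, w, phrases, rfl, rfl, hinv, hp⟩
  | cons c cs ih =>
    intro h d node w phrases hinv hp
    obtain ⟨hlen, hwp, hwn, hidx, hvals, hieq, hnodup, hkne, hpc, hcb⟩ := hinv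
    have hnode : node < h.length := lzWalk_lt h hcb w 0 node hlen hwn
    rw [List.foldl_cons, List.foldl_cons]
    cases hget : (h.getD node (PySem.Dict.empty, 0)).1.get? c with
    | some j =>
      -- A walks to the child; B extends w
      have hstepA : lzStepA (h, node, lzEmit d phrases, ((phrases.length : Nat) : Int), ((phrases.length : Nat) : Int), lzCz phrases) c
          = (h, j, lzEmit d phrases, ((phrases.length : Nat) : Int), ((phrases.length : Nat) : Int), lzCz phrases) := by
        simp only [lzStepA]
        rw [hget]
      have hwalkwc : lzWalk h 0 (w ++ [c]) = some j := lzWalk_step h node j c hget w hwn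
      have hpathwc : lzPathId d (w ++ [c]) = some j := by rw [← hwp]; exact hwalkwc
      have hmemwc : (w ++ [c]) ∈ d.keys := lzPathId_mem_keys d _ j (by simp) hpathwc
      have hstepB : lzParseStep (d, phrases, w) c = (d, phrases, w ++ [c]) := by
        simp only [lzParseStep]
        rw [if_pos ((PySem.Dict.contains_iff_mem_keys d _).mpr hmemwc)]
      rw [hstepA, hstepB]
      exact ih h d j (w ++ [c]) phrases
        ⟨hlen, hwp, hwalkwc, hidx, hvals, hieq, hnodup, hkne, hpc, hcb⟩ hp
    | none =>
      -- A emits a pair and inserts a new trie node; B emits the phrase (w, c)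
      have hwalkwc : lzWalk h 0 (w ++ [c]) = none := lzWalk_step_none h node c hget w hwn
      have hpathwc : lzPathId d (w ++ [c]) = none := by rw [← hwp]; exact hwalkwc
      have hgetwc : d.get? (w ++ [c]) = none := lzPathId_get_none d _ (by simp) hpathwc
      have hmemwc : (w ++ [c]) ∉ d.keys := (PySem.Dict.get?_eq_none_iff_not_mem_keys d _).mp hgetwc
      have hcontwc : d.contains (w ++ [c]) = false := by
        cases hcw : d.contains (w ++ [c]) with
        | false => rfl
        | true => exact absurd ((PySem.Dict.contains_iff_mem_keys d _).mp hcw) hmemwc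
      have hpw : lzPathId d w = some node := by rw [← hwp]; exact hwn
      set idx : Int := ((phrases.length : Nat) : Int) with hidxdef
      -- len(table): the dict holds exactly the phrases emitted so far
      have hsize : (d.size : Int) = idx := by
        have h1 : d.size = d.values.length := by
          simp [PySem.Dict.size, PySem.Dict.values]
        rw [h1, hvals, hidxdef]
        simp
        omega
      -- the emitted index is the same on both sides
      have hemit : (h.getD node (PySem.Dict.empty, 0)).2 = d.getD w 0 := by
        rw [hidx node hnode]
        by_cases hwnil : w = []
        · subst hwnil
          have : node = 0 := by
            have : lzWalk h 0 ([] : List Char) = some 0 := by simp [lzWalk]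
            rw [hwn] at this
            simpa using this
          subst this
          rw [PySem.Dict.getD_of_get?_eq_none]
          · rfl
          · rw [PySem.Dict.get?_eq_none_iff_not_mem_keys]
            intro hmem
            exact (hkne [] hmem) rfl
        · unfold lzPathId at hpw
          rw [if_neg hwnil] at hpw
          obtain ⟨v, hv, hvn⟩ := Option.map_eq_some_iff.mp hpw
          have hv1 : 1 ≤ v := lzVals_pos d hvals (by
            have := PySem.Dict.mem_items_of_get?_eq_some d hv
            simp only [PySem.Dict.values]
            exact List.mem_map.mpr ⟨_, this, rfl⟩)
          rw [PySem.Dict.getD_of_get?_eq_some d 0 hv]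
          omega
      set cur := h.getD node (PySem.Dict.empty, 0) with hcur
      set h2 := (h.set node (cur.1.insert c h.length, cur.2)) ++ [(PySem.Dict.empty, idx + 1)] with hh2
      set d2 := d.insert (w ++ [c]) (idx + 1) with hd2
      set phrases2 := phrases ++ [(w, c)] with hph2
      have hstepA : lzStepA (h, node, lzEmit d phrases, idx, idx, lzCz phrases) c =
          (h2, 0, lzEmit d phrases ++ [(cur.2, String.ofList [c])], idx + 1, idx + 1,
            max (lzCz phrases) (max 8 ((PySem.Int.bitLength (c.toNat : Int) : Int)))) := by
        simp only [lzStepA]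
        rw [hget]
        rw [if_pos (show idx < idx + 1 by omega)]
      have hstepB : lzParseStep (d, phrases, w) c = (d2, phrases2, ([] : List Char)) := by
        simp only [lzParseStep]
        rw [if_neg (by rw [hcontwc]; simp)]
        rw [List.dropLast_concat, hsize]
      rw [hstepA, hstepB]
      -- the three running values in canonical (phrase-list) form
      have hcode2 : lzEmit d phrases ++ [(cur.2, String.ofList [c])] = lzEmit d2 phrases2 := by
        rw [hph2, hd2, lzEmit_append, lzEmit_insert d phrases _ _ hp hmemwc (by simp),
          PySem.Dict.getD_insert, if_neg (by intro hh; simpa using congrArg List.length hh),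
          hemit]
      have hlen2' : idx + 1 = ((phrases2.length : Nat) : Int) := by
        rw [hph2, hidxdef]; simp
      have hcz2 : max (lzCz phrases) (max 8 ((PySem.Int.bitLength (c.toNat : Int) : Int))) = lzCz phrases2 := by
        rw [hph2, lzCz_append]
      rw [hcode2, hlen2', hcz2]
      -- facts about the new heap
      have hlen2 : h2.length = h.length + 1 := by simp [hh2]
      have hidxcast : idx + 1 = ((h.length : Nat) : Int) := by omega
      have hgA : ∀ k, k < h.length → k ≠ node →
          h2.getD k (PySem.Dict.empty, 0) = h.getD k (PySem.Dict.empty, 0) := by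
        intro k hk hknn
        rw [hh2, List.getD_eq_getElem?_getD, List.getElem?_append_left (by simpa using hk),
          List.getElem?_set, if_neg (fun hh => hknn hh.symm), ← List.getD_eq_getElem?_getD]
      have hgN : h2.getD node (PySem.Dict.empty, 0) = (cur.1.insert c h.length, cur.2) := by
        rw [hh2, List.getD_eq_getElem?_getD, List.getElem?_append_left (by simpa using hnode),
          List.getElem?_set, if_pos rfl, if_pos hnode]
        rfl
      have hgNew : h2.getD h.length (PySem.Dict.empty, 0) = (PySem.Dict.empty, idx + 1) := by
        have hcl := List.getElem?_concat_length (l := h.set node (cur.1.insert c h.length, cur.2))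
          (a := (PySem.Dict.empty, idx + 1))
        rw [List.length_set] at hcl
        rw [hh2, List.getD_eq_getElem?_getD, hcl]
        rfl
      -- the simulation relation for the new heap and dict
      have hwp2 : ∀ p, lzWalk h2 0 p = lzPathId d2 p := by
        intro p
        rw [hd2, hidxcast]
        exact lzWalk_insert h d node w c h2 hwp hwn hvals hpc hcb hnode hget
          (fun k hk hknn => by rw [hgA k hk hknn]) (by rw [hgN]) (by rw [hgNew])
          p 0 [] (by omega) (by simp [lzWalk])
      -- invariant components for the new state
      have hinv2 : lzInv h2 d2 0 [] (idx + 1) := by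
        refine ⟨by omega, hwp2, by simp [lzWalk], ?_, ?_, by rw [hlen2]; push_cast; omega,
          PySem.Dict.nodup_keys_insert d _ _ hnodup, ?_, ?_, ?_⟩
        · -- node indices are positions
          intro k hk
          rw [hlen2] at hk
          by_cases hkh : k = h.length
          · subst hkh
            rw [hgNew]
            simpa using hidxcast
          · have hk' : k < h.length := by omega
            by_cases hknn : k = node
            · subst hknn
              rw [hgN]
              exact hidx k hk'
            · rw [hgA k hk' hknn]
              exact hidx k hk'
        · -- values are 1..len-1 in order
          have hit := PySem.Dict.items_insert_of_not_contains d (idx + 1) hcontwc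
          simp only [PySem.Dict.values, hd2] at hvals ⊢
          rw [hit, List.map_append, hvals, hlen2]
          have h1 : h.length + 1 - 1 = (h.length - 1) + 1 := by omega
          rw [h1, List.range'_concat, List.map_append]
          refine congrArg₂ (· ++ ·) rfl ?_
          simp only [List.map_cons, List.map_nil, List.cons.injEq, and_true]
          rw [hidxcast]
          push_cast
          omega
        · -- keys are nonempty
          intro key hkey
          rw [hd2] at hkey
          rcases (PySem.Dict.mem_keys_insert d _ key _).mp hkey with rfl | hkey'
          · simp
          · exact hkne key hkey'
        · -- keys are prefix-closed
          intro key hkey p hpne hppre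
          rw [hd2] at hkey ⊢
          rcases (PySem.Dict.mem_keys_insert d _ key _).mp hkey with rfl | hkey'
          · rcases List.prefix_concat_iff.mp hppre with rfl | hpw'
            · exact (PySem.Dict.mem_keys_insert d _ _ _).mpr (Or.inl rfl)
            · refine (PySem.Dict.mem_keys_insert d _ _ _).mpr (Or.inr ?_)
              have hwne : w ≠ [] := by
                intro hwnil
                subst hwnil
                exact hpne (List.prefix_nil.mp hpw')
              have hwmem : w ∈ d.keys := lzPathId_mem_keys d w node hwne hpw
              exact hpc w hwmem p hpne hpw'
          · exact (PySem.Dict.mem_keys_insert d _ _ _).mpr (Or.inr (hpc key hkey' p hpne hppre))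
        · -- child pointers stay in range
          intro k hk x j hxj
          rw [hlen2] at hk
          by_cases hkh : k = h.length
          · subst hkh
            rw [hgNew] at hxj
            simp [PySem.Dict.get?_empty] at hxj
          · have hk' : k < h.length := by omega
            by_cases hknn : k = node
            · subst hknn
              rw [hgN, PySem.Dict.get?_insert] at hxj
              by_cases hxc : x = c
              · rw [if_pos hxc] at hxj
                have : j = h.length := by simpa using hxj.symm
                omega
              · rw [if_neg hxc] at hxj
                have := hcb k hk' x j hxj
                omega
            · rw [hgA k hk' hknn] at hxj
              have := hcb k hk' x j hxj
              omega
      have hp2 : ∀ pc ∈ phrases2, pc.1 = [] ∨ pc.1 ∈ d2.keys := by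
        intro pc hpcmem
        rw [hph2] at hpcmem
        rcases List.mem_append.mp hpcmem with hold | hnew
        · rcases hp pc hold with h0 | hk
          · exact Or.inl h0
          · exact Or.inr ((PySem.Dict.mem_keys_insert d _ _ _).mpr (Or.inr hk))
        · have : pc = (w, c) := by simpa using hnew
          subst this
          by_cases hwnil : w = []
          · exact Or.inl hwnil
          · exact Or.inr ((PySem.Dict.mem_keys_insert d _ _ _).mpr
              (Or.inr (lzPathId_mem_keys d w node hwnil hpw)))
      rw [hlen2'] at hinv2
      exact ih h2 d2 0 [] phrases2 hinv2 hp2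

-- ===== VERDICT (by name: the statement is the Claim_ definition above) =====
theorem lz78_encode_spec : Claim_equal_lz78_encode := by
  intro text _
  unfold Spec_lz78_encode lz78_encode lz78_encode_alt
  have hinv0 : lzInv [(PySem.Dict.empty, 0)] PySem.Dict.empty 0 [] 0 := by
    refine ⟨by simp, ?_, by simp [lzWalk], ?_, by simp [PySem.Dict.values, PySem.Dict.empty], by simp,
      by simp [PySem.Dict.keys, PySem.Dict.empty], ?_, ?_, ?_⟩
    · intro p
      cases p with
      | nil => simp [lzWalk, lzPathId]
      | cons x xs =>
        simp only [lzWalk, lzPathId]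
        rw [if_neg (by simp)]
        simp [PySem.Dict.get?_empty]
    · intro k hk
      have hk0 : k = 0 := by simp at hk; omega
      subst hk0
      simp
    · intro key hkey
      simp [PySem.Dict.keys, PySem.Dict.empty] at hkey
    · intro key hkey
      simp [PySem.Dict.keys, PySem.Dict.empty] at hkey
    · intro k hk x j hxj
      have hk0 : k = 0 := by simp at hk; omega
      subst hk0
      simp [PySem.Dict.get?_empty] at hxj
  obtain ⟨h', node', d', w', phrases', hA, hB, hinv, -⟩ :=
    lzLoop text.toList [(PySem.Dict.empty, 0)] PySem.Dict.empty 0 [] [] hinv0 (by simp)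
  have hA0 : List.foldl lzStepA ([(PySem.Dict.empty, 0)], 0, ([] : List (Int × String)), 0, 0, 0) text.toList
      = (h', node', lzEmit d' phrases', ((phrases'.length : Nat) : Int), ((phrases'.length : Nat) : Int), lzCz phrases') := hA
  rw [hA0, hB]
  dsimp only
  obtain ⟨hlen, hwp, hwn, hidx, hvals, hieq, hnodup, hkne, hpc, hcb⟩ := hinv
  have hnode : node' < h'.length := lzWalk_lt h' hcb w' 0 node' hlen hwn
  have hpw : lzPathId d' w' = some node' := by rw [← hwp]; exact hwn
  have hn2 : (h'.getD node' (PySem.Dict.empty, 0)).2 = (node' : Int) := hidx node' hnode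
  by_cases hwe : w' = []
  · subst hwe
    have hn0 : node' = 0 := by
      have : lzWalk h' 0 ([] : List Char) = some 0 := by simp [lzWalk]
      rw [hwn] at this
      simpa using this
    subst hn0
    rw [hn2]
    simp
  · have hwne : w' ≠ [] := hwe
    unfold lzPathId at hpw
    rw [if_neg hwne] at hpw
    obtain ⟨v, hv, hvn⟩ := Option.map_eq_some_iff.mp hpw
    have hv1 : 1 ≤ v := lzVals_pos d' hvals (by
      have := PySem.Dict.mem_items_of_get?_eq_some d' hv
      simp only [PySem.Dict.values]
      exact List.mem_map.mpr ⟨_, this, rfl⟩)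
    have hveq : v = (node' : Int) := by omega
    rw [hn2, if_pos (show (node' : Int) ≠ 0 by omega), if_pos hwne,
      PySem.Dict.getD_of_get?_eq_some d' 0 hv, hveq]
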